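-- pv_equiv track=rewrite | github.com/muhammed-ayman/codeforces-solutions | 1077B/main.py | compute_k
-- ===== SOURCE A (Python) =====
-- def compute_k(flats):
--     x = []
--     k = 0
--     for i in range(len(flats)):
--         if ((i != 0) and (i+1 != len(flats))):
--             if flats[i] == 0 and flats[i-1] == 1 and flats[i+1] == 1:
--                 x.append(i)
--     k = len(x)
--     for i in range(len(x)):
--         if i+1 != len(x):
--             if x[i]+2 == x[i+1]:
--                 x[i+1] -= 1
--                 k -= 1
--
--     return k
-- ===== SOURCE B (Python) =====
-- def compute_k(flats):
--     count = 0
--     prev = None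
--     for i in range(len(flats)):
--         if 0 < i < len(flats) - 1 and flats[i] == 0 and flats[i-1] == 1 and flats[i+1] == 1:
--             count += 1
--             if prev is not None and prev + 2 == i:
--                 count -= 1
--                 prev = i - 1
--             else:
--                 prev = i
--     return count
-- ===== Notes on version B (the rewrite author's own statement) =====
-- stated objective: simpler
-- what changed: B replaces A's two phases (build the list of detected indices, then a second pass that mutates that list and decrements the count on adjacent detections) by one pass over the indices keeping only a running count and the effective position of the last accepted detection.
import Mathlib
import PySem

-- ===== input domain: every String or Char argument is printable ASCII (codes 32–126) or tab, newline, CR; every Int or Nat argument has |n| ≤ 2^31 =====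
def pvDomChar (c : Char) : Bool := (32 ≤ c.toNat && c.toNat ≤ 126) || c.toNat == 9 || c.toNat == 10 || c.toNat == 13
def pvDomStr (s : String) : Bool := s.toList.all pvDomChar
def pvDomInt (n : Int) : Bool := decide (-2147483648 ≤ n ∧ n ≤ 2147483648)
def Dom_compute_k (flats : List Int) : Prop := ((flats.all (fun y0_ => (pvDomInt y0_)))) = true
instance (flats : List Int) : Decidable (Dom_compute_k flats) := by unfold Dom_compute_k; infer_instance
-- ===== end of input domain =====

-- B does one pass with a running count and an effective-previous position instead of A's
-- build-list-then-mutate second pass; same O(n) cost, simpler state.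

-- ===== PORT A =====
-- body of A's first loop ('if interior and 0-between-1s: x.append(i)'); pyGetD is exact here:
-- every index Python reads is in range under the guard, so no IndexError can occur.
def detectStep (flats : List Int) (n : Int) (x : List Int) (i : Int) : List Int :=
  if i ≠ 0 ∧ i + 1 ≠ n then
    if PySem.List.pyGetD flats i 0 = 0 ∧ PySem.List.pyGetD flats (i - 1) 0 = 1 ∧
        PySem.List.pyGetD flats (i + 1) 0 = 1 then
      x ++ [i]
    else x
  else x

-- body of A's second loop ('if x[i]+2 == x[i+1]: x[i+1] -= 1; k -= 1'); indices are in range.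
def mergeStepA (s : List Int × Int) (i : Int) : List Int × Int :=
  if i + 1 ≠ (s.1.length : Int) then
    if PySem.List.pyGetD s.1 i 0 + 2 = PySem.List.pyGetD s.1 (i + 1) 0 then
      (s.1.set (i + 1).toNat (PySem.List.pyGetD s.1 (i + 1) 0 - 1), s.2 - 1)
    else s
  else s

def compute_k (flats : List Int) : Int :=
  let x := (PySem.List.pyRange 0 (flats.length : Int) 1).foldl
             (detectStep flats (flats.length : Int)) []
  let k : Int := (x.length : Int)
  ((PySem.List.pyRange 0 (x.length : Int) 1).foldl mergeStepA (x, k)).2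

-- ===== PORT B =====
-- body of B's single loop: count += 1; merge with the effective previous detection if adjacent.
def altStep (flats : List Int) (n : Int) (s : Int × Option Int) (i : Int) : Int × Option Int :=
  if (0 < i ∧ i < n - 1) ∧ PySem.List.pyGetD flats i 0 = 0 ∧
      PySem.List.pyGetD flats (i - 1) 0 = 1 ∧ PySem.List.pyGetD flats (i + 1) 0 = 1 then
    let c := s.1 + 1
    match s.2 with
    | some q => if q + 2 = i then (c - 1, some (i - 1)) else (c, some i)
    | none => (c, some i)
  else s

def compute_k_alt (flats : List Int) : Int :=
  ((PySem.List.pyRange 0 (flats.length : Int) 1).foldl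
    (altStep flats (flats.length : Int)) (0, none)).1

-- ===== PRECONDITION & SPEC =====
def Spec_compute_k (flats : List Int) (out : Int) : Prop := out = compute_k_alt flats
instance (flats : List Int) (out : Int) : Decidable (Spec_compute_k flats out) := by unfold Spec_compute_k; infer_instance

-- ===== CLAIM (what is proved, stated in full; the proofs are below) =====
def Claim_equal_compute_k : Prop := ∀ (flats : List Int), Dom_compute_k flats → Spec_compute_k flats (compute_k flats)

-- ===== LEMMAS AND PROOFS =====

-- number of merges A's second pass performs on a detection list, given the effective
-- value of the previous accepted detection
def mergesFrom : Int → List Int → Int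
  | _, [] => 0
  | q, p :: r => if q + 2 = p then 1 + mergesFrom (p - 1) r else mergesFrom p r

-- B's merge body once the detection condition holds
def bodyB (s : Int × Option Int) (i : Int) : Int × Option Int :=
  let c := s.1 + 1
  match s.2 with
  | some q => if q + 2 = i then (c - 1, some (i - 1)) else (c, some i)
  | none => (c, some i)

lemma bfold : ∀ (l : List Int) (k q : Int),
    (l.foldl bodyB (k, some q)).1 = k + l.length - mergesFrom q l := by
  intro l
  induction l with
  | nil => intro k q; simp [mergesFrom]
  | cons p r ih =>
    intro k q
    by_cases h : q + 2 = p
    · simp only [List.foldl_cons, bodyB, h, if_pos, mergesFrom, ih]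
      simp only [List.length_cons]; push_cast; omega
    · simp only [List.foldl_cons, bodyB, mergesFrom, if_neg h, ih]
      simp only [List.length_cons]; push_cast; omega

lemma Aloop : ∀ (m : Nat) (x : List Int) (i : Nat) (k : Int), x.length - i = m → i < x.length →
    ((PySem.List.pyRange (i : Int) (x.length : Int) 1).foldl mergeStepA (x, k)).2
      = k - mergesFrom (x.getD i 0) (x.drop (i + 1)) := by
  intro m
  induction m with
  | zero => intro x i k hm hi; omega
  | succ m ih =>
    intro x i k hm hi
    rw [PySem.List.pyRange_one_cons (by exact_mod_cast hi)]
    simp only [List.foldl_cons]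
    by_cases hend : (i : Int) + 1 = (x.length : Int)
    · have hx : mergeStepA (x, k) (i : Int) = (x, k) := by
        simp [mergeStepA, hend]
      rw [hx, PySem.List.pyRange_one_eq_nil (by omega)]
      have hd : x.drop (i + 1) = [] := by
        apply List.drop_eq_nil_of_le; omega
      simp [hd, mergesFrom]
    · have hlt : i + 1 < x.length := by omega
      have ha : PySem.List.pyGetD x (i : Int) 0 = x.getD i 0 := PySem.List.pyGetD_natCast x i 0
      have hb : PySem.List.pyGetD x ((i : Int) + 1) 0 = x.getD (i + 1) 0 := by
        have := PySem.List.pyGetD_natCast x (i + 1) 0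
        push_cast at this; exact this
      have hdrop : x.drop (i + 1) = x.getD (i + 1) 0 :: x.drop (i + 2) := by
        rw [List.getD_eq_getElem x 0 hlt, List.drop_eq_getElem_cons hlt]
      by_cases hab : x.getD i 0 + 2 = x.getD (i + 1) 0
      · have hx : mergeStepA (x, k) (i : Int)
            = (x.set (i + 1) (x.getD (i + 1) 0 - 1), k - 1) := by
          have ht : ((i : Int) + 1).toNat = i + 1 := by omega
          simp only [mergeStepA]
          rw [if_pos hend, ha, hb, if_pos hab, ht]
        rw [hx]
        have hlen : (x.set (i + 1) (x.getD (i + 1) 0 - 1)).length = x.length :=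
          List.length_set ..
        have hrec := ih (x.set (i + 1) (x.getD (i + 1) 0 - 1)) (i + 1) (k - 1)
          (by rw [hlen]; omega) (by rw [hlen]; omega)
        rw [hlen] at hrec
        have hcast : ((i : Int) + 1) = (((i + 1 : Nat)) : Int) := by push_cast; ring
        rw [hcast, hrec]
        have hg : (x.set (i + 1) (x.getD (i + 1) 0 - 1)).getD (i + 1) 0
            = x.getD (i + 1) 0 - 1 := by
          rw [List.getD_eq_getElem _ 0 (by omega)]
          simp
        have hd2 : (x.set (i + 1) (x.getD (i + 1) 0 - 1)).drop (i + 2)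
            = x.drop (i + 2) := by
          rw [List.drop_set]
          simp
        rw [hg, hd2, hdrop]
        have hm2 : mergesFrom (x.getD i 0) (x.getD (i + 1) 0 :: x.drop (i + 2))
            = 1 + mergesFrom (x.getD (i + 1) 0 - 1) (x.drop (i + 2)) := by
          simp only [mergesFrom]; rw [if_pos hab]
        rw [hm2]; omega
      · have hx : mergeStepA (x, k) (i : Int) = (x, k) := by
          simp only [mergeStepA]
          rw [if_pos hend, ha, hb, if_neg hab]
        rw [hx]
        have hrec := ih x (i + 1) k (by omega) (by omega)
        have hcast : ((i : Int) + 1) = (((i + 1 : Nat)) : Int) := by push_cast; ring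
        rw [hcast, hrec, hdrop]
        have hm2 : mergesFrom (x.getD i 0) (x.getD (i + 1) 0 :: x.drop (i + 2))
            = mergesFrom (x.getD (i + 1) 0) (x.drop (i + 2)) := by
          simp only [mergesFrom]; rw [if_neg hab]
        rw [hm2]

-- the detection conditions of A and B agree on range indices
lemma cond_eq (flats : List Int) (i : Int) (hi : 0 ≤ i) (hn : i < (flats.length : Int)) :
    (decide ((i ≠ 0 ∧ i + 1 ≠ (flats.length : Int)) ∧
      (PySem.List.pyGetD flats i 0 = 0 ∧ PySem.List.pyGetD flats (i - 1) 0 = 1 ∧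
       PySem.List.pyGetD flats (i + 1) 0 = 1)))
    = decide ((0 < i ∧ i < (flats.length : Int) - 1) ∧
      PySem.List.pyGetD flats i 0 = 0 ∧ PySem.List.pyGetD flats (i - 1) 0 = 1 ∧
      PySem.List.pyGetD flats (i + 1) 0 = 1) := by
  simp only [decide_eq_decide]
  constructor
  · rintro ⟨⟨h1, h2⟩, h3⟩; exact ⟨⟨by omega, by omega⟩, h3⟩
  · rintro ⟨⟨h1, h2⟩, h3⟩; exact ⟨⟨by omega, by omega⟩, h3⟩

-- the second pass of A and the merge fold of B compute the same count on any detection list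
lemma finalEq (L : List Int) :
    ((PySem.List.pyRange 0 (L.length : Int) 1).foldl mergeStepA (L, (L.length : Int))).2
      = (L.foldl bodyB (0, none)).1 := by
  cases L with
  | nil => simp [PySem.List.pyRange_one_eq_nil (by norm_num : (0:Int) ≤ 0)]
  | cons p r =>
    have h := Aloop (p :: r).length (p :: r) 0 ((p :: r).length : Int) (by omega) (by simp)
    simp only [Nat.cast_zero] at h
    rw [h]
    have hB : ((p :: r).foldl bodyB (0, none)).1 = 0 + 1 + (r.length : Int) - mergesFrom p r := by
      have := bfold r (0 + 1) p
      simpa [bodyB] using this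
    rw [hB]
    have hdr : List.drop 1 (p :: r) = r := rfl
    simp only [List.getD_cons_zero, hdr, List.length_cons]
    push_cast
    omega

-- ===== VERDICT (by name: the statement is the Claim_ definition above) =====
theorem compute_k_spec : Claim_equal_compute_k := by
  intro flats _
  unfold Spec_compute_k compute_k compute_k_alt
  have hdet : detectStep flats (flats.length : Int) = fun x i =>
      if (i ≠ 0 ∧ i + 1 ≠ (flats.length : Int)) ∧
          (PySem.List.pyGetD flats i 0 = 0 ∧ PySem.List.pyGetD flats (i - 1) 0 = 1 ∧
           PySem.List.pyGetD flats (i + 1) 0 = 1) then x ++ [i] else x := by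
    funext x i
    simp only [detectStep]
    split_ifs <;> tauto
  have halt : altStep flats (flats.length : Int) = fun s i =>
      if (0 < i ∧ i < (flats.length : Int) - 1) ∧
          PySem.List.pyGetD flats i 0 = 0 ∧ PySem.List.pyGetD flats (i - 1) 0 = 1 ∧
          PySem.List.pyGetD flats (i + 1) 0 = 1 then bodyB s i else s := rfl
  rw [hdet, halt, PySem.List.foldl_append_ite_eq_filter, PySem.List.foldl_ite_eq_foldl_filter,
    List.nil_append]
  rw [List.filter_congr (fun i hi => by
    have hmem := (PySem.List.mem_pyRange_one).1 hi
    exact cond_eq flats i hmem.1 hmem.2)]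
  exact finalEq _
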